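-- pv_equiv track=rewrite | github.com/tempstabilizer2018group/tempstabilizer2018 | software/http_server/python/python3_grafana_log_reader_lib.py | ValuesIterator
-- ===== SOURCE A (Python) =====
-- def ValuesIterator(strPayload):
--   '''
--     'O20000H0U19000LS19000z1525'
--     O 20000
--     H 0
--     U 19000
--     L
--     S 19000
--     z 1525
--     k
--   '''
--   iPosStart = 0
--   assert len(strPayload) >= 1
--   assert strPayload[0].isalpha()
--   for iPos in range(1, len(strPayload)):
--     if strPayload[iPos].isalpha():
--       yield strPayload[iPosStart], strPayload[iPosStart+1:iPos]
--       iPosStart = iPos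
--   yield strPayload[iPosStart], strPayload[iPosStart+1:len(strPayload)]
-- ===== SOURCE B (Python) =====
-- def ValuesIterator(strPayload):
--     assert len(strPayload) >= 1
--     assert strPayload[0].isalpha()
--     bounds = [(i, c) for i, c in enumerate(strPayload) if c.isalpha()]
--     for (b0, c), (b1, _) in zip(bounds, bounds[1:] + [(len(strPayload), '')]):
--         yield c, strPayload[b0 + 1 : b1]
-- ===== Notes on version B (the rewrite author's own statement) =====
-- stated objective: alternative
-- what changed: Replaces A's interleaved scan that mutates a start index and emits on each alpha with a two-phase decomposition: first build the table of (index, letter) boundaries by a filter over enumerate, then emit by zipping the table with its own shifted-by-one copy (sentinel = end of string).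
import Mathlib
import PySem

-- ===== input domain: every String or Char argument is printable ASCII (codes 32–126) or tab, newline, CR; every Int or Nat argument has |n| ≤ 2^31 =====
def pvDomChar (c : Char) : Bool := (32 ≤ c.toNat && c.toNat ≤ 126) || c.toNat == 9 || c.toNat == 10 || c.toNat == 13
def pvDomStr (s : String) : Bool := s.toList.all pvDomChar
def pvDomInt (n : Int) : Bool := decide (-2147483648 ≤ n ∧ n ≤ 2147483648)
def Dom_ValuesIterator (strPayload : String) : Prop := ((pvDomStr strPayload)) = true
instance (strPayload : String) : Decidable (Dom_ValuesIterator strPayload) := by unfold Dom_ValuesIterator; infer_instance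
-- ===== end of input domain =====

-- B replaces A's interleaved scan-and-emit with a boundary table (filter over enumerate)
-- followed by a zip-with-shifted-copy emission pass (objective: alternative decomposition).

-- ===== PORT A =====
-- literal transliteration of A: fold over range(1, len) carrying (iPosStart, emitted pairs),
-- then the final yield; indexing via pyGetD (always in range on Pre_).
def ValuesIterator (strPayload : String) : List (String × String) :=
  let s := strPayload.toList
  let n : Int := (s.length : Int)
  let st := (PySem.List.pyRange 1 n 1).foldl
    (fun (st : Int × List (String × String)) iPos =>
      if PySem.Chars.isalpha (PySem.List.pyGetD s iPos ' ') then
        (iPos, st.2 ++ [(String.ofList [PySem.List.pyGetD s st.1 ' '],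
                         String.ofList (PySem.List.slice s (some (st.1 + 1)) (some iPos)))])
      else st)
    ((0 : Int), ([] : List (String × String)))
  st.2 ++ [(String.ofList [PySem.List.pyGetD s st.1 ' '],
            String.ofList (PySem.List.slice s (some (st.1 + 1)) (some n)))]

-- ===== PORT B =====
-- literal transliteration of Source B: boundary table, then zip with the shifted table plus sentinel.
def ValuesIterator_alt (strPayload : String) : List (String × String) :=
  let s := strPayload.toList
  let bounds := (PySem.List.enumerate s 0).filter (fun p => PySem.Chars.isalpha p.2)
  (bounds.zip (bounds.tail ++ [((s.length : Int), ' ')])).map (fun q =>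
    (String.ofList [q.1.2], String.ofList (PySem.List.slice s (some (q.1.1 + 1)) (some q.2.1))))

-- ===== PRECONDITION & SPEC =====
-- Pre_ excludes exactly the inputs on which A's asserts fail (empty payload or a
-- non-alphabetic first character): there A raises AssertionError.
def Pre_ValuesIterator (strPayload : String) : Prop :=
  strPayload.toList ≠ [] ∧ PySem.Chars.isalpha strPayload.toList.headI = true
instance (strPayload : String) : Decidable (Pre_ValuesIterator strPayload) := by unfold Pre_ValuesIterator; infer_instance
def pvWitness_ValuesIterator : String := "O20H0z15"
def Spec_ValuesIterator (strPayload : String) (out : List (String × String)) : Prop := out = ValuesIterator_alt strPayload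
instance (strPayload : String) (out : List (String × String)) : Decidable (Spec_ValuesIterator strPayload out) := by unfold Spec_ValuesIterator; infer_instance

-- ===== CLAIM (what is proved, stated in full; the proofs are below) =====
def Claim_equal_ValuesIterator : Prop := ∀ (strPayload : String), Dom_ValuesIterator strPayload → Pre_ValuesIterator strPayload → Spec_ValuesIterator strPayload (ValuesIterator strPayload)

-- ===== LEMMAS AND PROOFS =====

-- the pair emitted for a segment [a, b)
def pvPair (s : List Char) (a b : Int) : String × String :=
  (String.ofList [PySem.List.pyGetD s a ' '], String.ofList (PySem.List.slice s (some (a + 1)) (some b)))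

-- A's loop body, named so the fold lemma can speak about it
def pvF (s : List Char) (st : Int × List (String × String)) (iPos : Int) : Int × List (String × String) :=
  if PySem.Chars.isalpha (PySem.List.pyGetD s iPos ' ') then
    (iPos, st.2 ++ [pvPair s st.1 iPos])
  else st

-- alpha indices of s in [a, len s)
def pvAlphaIdx (s : List Char) (a : Int) : List Int :=
  (PySem.List.pyRange a (s.length : Int) 1).filter
    (fun i => PySem.Chars.isalpha (PySem.List.pyGetD s i ' '))

-- emission from a current start p and remaining boundary list
def pvEmit (s : List Char) (p : Int) : List Int → List (String × String)
  | [] => [pvPair s p (s.length : Int)]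
  | q :: l => pvPair s p q :: pvEmit s q l

lemma pvA_eq_fold (strPayload : String) :
    ValuesIterator strPayload =
      (let s := strPayload.toList
       let st := (PySem.List.pyRange 1 (s.length : Int) 1).foldl (pvF s) (0, [])
       st.2 ++ [pvPair s st.1 (s.length : Int)]) := rfl

lemma pvFold_eq (s : List Char) (a p : Int) (acc : List (String × String)) :
    (let st := (PySem.List.pyRange a (s.length : Int) 1).foldl (pvF s) (p, acc)
     st.2 ++ [pvPair s st.1 (s.length : Int)]) = acc ++ pvEmit s p (pvAlphaIdx s a) := by
  by_cases h : (s.length : Int) ≤ a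
  · simp [pvAlphaIdx, PySem.List.pyRange_one_eq_nil h, pvEmit]
  · replace h : a < (s.length : Int) := by omega
    have hrec := pvFold_eq s (a + 1)
    rw [show pvAlphaIdx s a
        = (PySem.List.pyRange a (s.length : Int) 1).filter
            (fun i => PySem.Chars.isalpha (PySem.List.pyGetD s i ' ')) from rfl,
      PySem.List.pyRange_one_cons h]
    by_cases ha : PySem.Chars.isalpha (PySem.List.pyGetD s a ' ')
    · simp only [List.foldl_cons, List.filter_cons, ha, pvF]
      rw [show (PySem.List.pyRange (a + 1) (s.length : Int) 1).filter
            (fun i => PySem.Chars.isalpha (PySem.List.pyGetD s i ' ')) = pvAlphaIdx s (a + 1) from rfl]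
      simpa [pvEmit] using hrec a (acc ++ [pvPair s p a])
    · simp only [List.foldl_cons, List.filter_cons, ha, pvF]
      rw [show (PySem.List.pyRange (a + 1) (s.length : Int) 1).filter
            (fun i => PySem.Chars.isalpha (PySem.List.pyGetD s i ' ')) = pvAlphaIdx s (a + 1) from rfl]
      simpa using hrec p acc
termination_by ((s.length : Int) - a).toNat
decreasing_by omega

lemma pvEmit_eq_zip (s : List Char) (l : List Int) (p : Int) :
    pvEmit s p l = ((p :: l).zip (l ++ [(s.length : Int)])).map
      (fun q => pvPair s q.1 q.2) := by
  induction l generalizing p with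
  | nil => simp [pvEmit]
  | cons q l ih => simp [pvEmit, ih q]

lemma pvGetD_len (s : List Char) (d : Char) : PySem.List.pyGetD s (s.length : Int) d = d := by
  simp [PySem.List.pyGetD, PySem.List.pyGet?, PySem.List.pyIdx?]

lemma pvMain (s : List Char) (hne : s ≠ []) (halpha : PySem.Chars.isalpha s.headI = true) :
    (let st := (PySem.List.pyRange 1 (s.length : Int) 1).foldl (pvF s) (0, [])
     st.2 ++ [pvPair s st.1 (s.length : Int)])
    = (let bounds := (PySem.List.enumerate s 0).filter (fun p => PySem.Chars.isalpha p.2)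
       (bounds.zip (bounds.tail ++ [((s.length : Int), ' ')])).map (fun q =>
         (String.ofList [q.1.2], String.ofList (PySem.List.slice s (some (q.1.1 + 1)) (some q.2.1))))) := by
  have hlen : 0 < (s.length : Int) := by
    cases s with
    | nil => exact absurd rfl hne
    | cons c t => simp
  have hh0 : PySem.List.pyGetD s 0 ' ' = s.headI := by
    cases s with
    | nil => exact absurd rfl hne
    | cons c t => simp [PySem.List.pyGetD, PySem.List.pyGet?, PySem.List.pyIdx?]
  have hbounds :
      (PySem.List.enumerate s 0).filter (fun p => PySem.Chars.isalpha p.2)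
        = (pvAlphaIdx s 0).map (fun j => (j, PySem.List.pyGetD s j ' ')) := by
    rw [show PySem.List.enumerate s 0 = PySem.List.enumerate s from rfl,
      PySem.List.enumerate_eq_map_pyRange s ' ', List.filter_map]
    rfl
  have hsplit : pvAlphaIdx s 0 = 0 :: pvAlphaIdx s 1 := by
    unfold pvAlphaIdx
    rw [PySem.List.pyRange_one_cons hlen]
    simp [hh0, halpha]
  rw [pvFold_eq s 1 0 []]
  simp only [hbounds, hsplit]
  rw [pvEmit_eq_zip]
  rw [List.map_cons, List.tail_cons]
  rw [show (pvAlphaIdx s 1).map (fun j => (j, PySem.List.pyGetD s j ' ')) ++ [((s.length : Int), ' ')]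
      = (pvAlphaIdx s 1 ++ [(s.length : Int)]).map (fun j => (j, PySem.List.pyGetD s j ' ')) by
    rw [List.map_append, List.map_singleton, pvGetD_len]]
  rw [show ((0 : Int), PySem.List.pyGetD s 0 ' ')
        :: (pvAlphaIdx s 1).map (fun j => (j, PySem.List.pyGetD s j ' '))
      = ((0 : Int) :: pvAlphaIdx s 1).map (fun j => (j, PySem.List.pyGetD s j ' ')) from rfl]
  rw [List.zip_map, List.map_map]
  rfl

theorem ValuesIterator_spec : Claim_equal_ValuesIterator := by
  intro sp _ hpre
  obtain ⟨hne, halpha⟩ := hpre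
  unfold Spec_ValuesIterator
  rw [pvA_eq_fold]
  exact pvMain sp.toList hne halpha
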